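-- pv_equiv track=rewrite | github.com/dreamsdk/codeblocks | codeblocks/src/plugins/contrib/FortranProject/images/fortranproject/gdb_fortran_extensions_v1.0.py | get_var_name
-- ===== SOURCE A (Python) =====
-- def get_var_name(arg):
--
--     arg = arg.strip()
--     vname = arg
--     inBr = 1
--     if arg.endswith(')'):
--         for i in range(len(arg)-2, -1, -1):
--             s1 = arg[i]
--             if s1 == ')':
--                 inBr += 1
--             elif s1 == '(':
--                 inBr -= 1
--                 if inBr == 0:
--                     vname = arg[:i]
--     return vname
-- ===== SOURCE B (Python) =====
-- def get_var_name(arg):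
--     """Return arg without its trailing parenthesized part (e.g. 'arr(i,j)' -> 'arr')."""
--     arg = arg.strip()
--     if not arg.endswith(')'):
--         return arg
--     for i, c in enumerate(arg):
--         if c == '(' and arg[i:].count('(') == arg[i:].count(')'):
--             return arg[:i]
--     return arg
-- ===== Notes on version B (the rewrite author's own statement) =====
-- stated objective: simpler
-- what changed: A runs one backward scan over the whole string keeping a bracket counter and repeatedly overwriting vname; B scans forward once and cuts before the first opening parenthesis whose tail contains equally many opening and closing parentheses - a declarative first-match search instead of a stateful backward counter.
import Mathlib
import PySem

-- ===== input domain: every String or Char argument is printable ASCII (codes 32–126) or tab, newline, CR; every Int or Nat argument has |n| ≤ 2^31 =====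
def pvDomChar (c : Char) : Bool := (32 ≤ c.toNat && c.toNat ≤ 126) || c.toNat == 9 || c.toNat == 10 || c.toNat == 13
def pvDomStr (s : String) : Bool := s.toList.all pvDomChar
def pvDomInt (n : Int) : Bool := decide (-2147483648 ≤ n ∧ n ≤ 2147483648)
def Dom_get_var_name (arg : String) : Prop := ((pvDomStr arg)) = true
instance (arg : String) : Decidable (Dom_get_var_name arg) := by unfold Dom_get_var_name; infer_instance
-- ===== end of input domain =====

-- B replaces A's single backward bracket-counting scan by a declarative forward search:
-- cut before the first '(' whose tail holds equally many '(' and ')' (objective: simpler, not faster).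

-- ===== PORT A =====
-- one step of A's backward for-loop; state = (inBr, vname)
def stepA (s : List Char) (st : Int × List Char) (i : Int) : Int × List Char :=
  let s1 := PySem.List.pyGetD s i ' '   -- arg[i]; i is always in range here, default never used
  if s1 = ')' then (st.1 + 1, st.2)
  else if s1 = '(' then
    let inBr := st.1 - 1
    if inBr = 0 then (inBr, PySem.List.slice s none (some i)) else (inBr, st.2)
  else st

def get_var_name (arg : String) : String :=
  let a := PySem.Str.strip arg
  let s := a.toList
  if PySem.Str.endswith a ")" then
    let st := (PySem.List.pyRange (PySem.List.len s - 2) (-1) (-1)).foldl (stepA s) (1, s)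
    String.ofList st.2
  else a

-- ===== PORT B =====
-- Source B's 'for i, c in enumerate(arg)' loop: return arg[:i] at the first i where
-- arg[i] = '(' and arg[i:] contains equally many '(' and ')'
def altGo (s : List Char) : List Char → Nat → List Char
  | [], _ => s
  | c :: rest, i =>
    let tail := PySem.List.slice s (some (i : Int)) none   -- arg[i:]
    if c = '(' ∧ PySem.Chars.count tail ['('] = PySem.Chars.count tail [')'] then
      PySem.List.slice s none (some (i : Int))             -- arg[:i]
    else altGo s rest (i + 1)

def get_var_name_alt (arg : String) : String :=
  let a := PySem.Str.strip arg
  let s := a.toList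
  if PySem.Str.endswith a ")" then String.ofList (altGo s s 0) else a

-- ===== PRECONDITION & SPEC =====
def Spec_get_var_name (arg : String) (out : String) : Prop := out = get_var_name_alt arg
instance (arg : String) (out : String) : Decidable (Spec_get_var_name arg out) := by
  unfold Spec_get_var_name; infer_instance

-- ===== CLAIM =====
def Claim_equal_get_var_name : Prop :=
  ∀ (arg : String), Dom_get_var_name arg → Spec_get_var_name arg (get_var_name arg)

-- ===== LEMMAS AND PROOFS =====

-- net bracket balance: +1 per '(', -1 per ')'
def pvW (c : Char) : Int := if c = '(' then 1 else if c = ')' then -1 else 0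
def pvNet (l : List Char) : Int := (l.map pvW).sum

-- the hit condition both programs decide at index i: s[i] is '(' and the tail is count-balanced
def pvCond (s : List Char) (i : Nat) : Bool :=
  (s[i]? == some '(') && ((s.drop i).count '(' == (s.drop i).count ')')

-- result as a function of the first hit (v = fallback)
def pvResV (s v : List Char) : Option Nat → List Char
  | some i => s.take i
  | none => v

theorem pvNet_cons (c : Char) (l : List Char) : pvNet (c :: l) = pvW c + pvNet l := by
  simp [pvNet]

-- Chars.count with a single-character needle is List.count
theorem pvCountGo (c : Char) : ∀ (fuel : Nat) (l : List Char) (acc : Nat), l.length ≤ fuel →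
    PySem.Chars.count.go [c] fuel l acc = acc + l.count c := by
  intro fuel
  induction fuel with
  | zero => intro l acc h; simp at h; simp [h, PySem.Chars.count.go]
  | succ n ih =>
    intro l acc h
    cases l with
    | nil => simp [PySem.Chars.count.go]
    | cons x t =>
      simp only [PySem.Chars.count.go]
      by_cases hx : x = c
      · subst hx
        simp [List.isPrefixOf, ih t (acc + 1) (by simpa using h)]
        omega
      · simp [List.isPrefixOf, hx, ih t acc (by simpa using h)]
        simp [Ne.symm hx]

theorem pvCountSingle (l : List Char) (c : Char) : PySem.Chars.count l [c] = l.count c := by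
  simp [PySem.Chars.count, pvCountGo c l.length l 0 le_rfl]

theorem pvNet_eq (l : List Char) : pvNet l = (l.count '(' : Int) - (l.count ')' : Int) := by
  induction l with
  | nil => simp [pvNet]
  | cons c t ih =>
    rw [pvNet_cons, ih]
    by_cases h1 : c = '('
    · simp [pvW, h1]; ring
    · by_cases h2 : c = ')'
      · simp [pvW, h2]; ring
      · simp [pvW, h1, h2]

-- B's forward scan finds the first hit
theorem pvLB (s : List Char) : ∀ (suf : List Char) (i : Nat), suf = s.drop i →
    altGo s suf i = pvResV s s ((List.range' i suf.length).find? (pvCond s)) := by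
  intro suf
  induction suf with
  | nil => intro i _; simp [altGo, pvResV]
  | cons c rest ih =>
    intro i h
    have hget : s[i]? = some c := by
      have : (s.drop i)[0]? = some c := by rw [← h]; rfl
      simpa using this
    have hdrop1 : s.drop (i + 1) = rest := by
      have : (s.drop i).drop 1 = rest := by rw [← h]; rfl
      simpa [List.drop_drop, Nat.add_comm] using this
    simp only [altGo, PySem.List.slice_from_natCast, ← h, pvCountSingle, List.length_cons]
    rw [List.range'_succ]
    by_cases hc : c = '(' ∧ (c :: rest).count '(' = (c :: rest).count ')'
    · rw [if_pos hc]
      have hcond : pvCond s i = true := by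
        have hcnt : (s.drop i).count '(' = (s.drop i).count ')' := by rw [← h]; exact hc.2
        simp [pvCond, hget, hc.1, hcnt]
      simp [hcond, pvResV, PySem.List.slice_to_natCast]
    · rw [if_neg hc]
      have hcond : pvCond s i = false := by
        by_cases h1 : c = '('
        · have h2 : ¬ (s.drop i).count '(' = (s.drop i).count ')' := by
            rw [← h]; exact fun hcnt => hc ⟨h1, hcnt⟩
          simp [pvCond, hget, h1, h2]
        · simp [pvCond, hget, h1]
      simp [hcond, ih (i + 1) hdrop1.symm]

-- A's backward fold: inBr tracks -net(drop k), vname the least hit so far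
theorem pvLA (s : List Char) : ∀ (k : Nat), k ≤ s.length → ∀ (v : List Char),
    (PySem.List.pyRange ((k : Int) - 1) (-1) (-1)).foldl (stepA s) (-pvNet (s.drop k), v)
      = (-pvNet s, pvResV s v ((List.range k).find? (pvCond s))) := by
  intro k
  induction k with
  | zero =>
    intro _ v
    rw [PySem.List.pyRange_neg_one_eq_nil (by norm_num)]
    simp [pvResV]
  | succ k ih =>
    intro hk v
    have hk' : k < s.length := hk
    have hdrop : s.drop k = s[k] :: s.drop (k + 1) := List.drop_eq_getElem_cons hk'
    have hnet : pvNet (s.drop k) = pvW s[k] + pvNet (s.drop (k + 1)) := by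
      rw [hdrop, pvNet_cons]
    have hrange : PySem.List.pyRange (((k + 1 : Nat) : Int) - 1) (-1) (-1)
        = (k : Int) :: PySem.List.pyRange ((k : Int) - 1) (-1) (-1) := by
      have he : ((k + 1 : Nat) : Int) - 1 = (k : Int) := by push_cast; ring
      rw [he]
      exact PySem.List.pyRange_neg_one_cons (by omega)
    have hgetD : PySem.List.pyGetD s (k : Int) ' ' = s[k] := by
      simp [PySem.List.pyGetD_natCast, List.getD_eq_getElem?_getD, hk']
    have hfind : (List.range (k + 1)).find? (pvCond s)
        = ((List.range k).find? (pvCond s)).or ((if pvCond s k then some k else none)) := by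
      rw [List.range_succ, List.find?_append]
      cases hfk : (List.range k).find? (pvCond s) <;>
        cases hpc : pvCond s k <;> simp [List.find?, hpc]
    rw [hrange, List.foldl_cons]
    by_cases h1 : s[k] = ')'
    · have hw : pvW s[k] = -1 := by rw [h1]; decide
      have hcond : pvCond s k = false := by
        simp [pvCond, List.getElem?_eq_getElem hk', h1]
      have hbr : -pvNet (s.drop (k + 1)) + 1 = -pvNet (s.drop k) := by omega
      have hstep : stepA s (-pvNet (s.drop (k + 1)), v) (k : Int) = (-pvNet (s.drop k), v) := by
        simp [stepA, hgetD, h1, hbr]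
      rw [hstep, ih (Nat.le_of_succ_le hk) v, hfind, hcond]
      simp
    · by_cases h2 : s[k] = '('
      · have hw : pvW s[k] = 1 := by rw [h2]; decide
        have hbr : -pvNet (s.drop (k + 1)) - 1 = -pvNet (s.drop k) := by omega
        by_cases hz : pvNet (s.drop k) = 0
        · have hcond : pvCond s k = true := by
            have hcnt : (s.drop k).count '(' = (s.drop k).count ')' := by
              have := pvNet_eq (s.drop k)
              omega
            simp [pvCond, List.getElem?_eq_getElem hk', h2, hcnt]
          have hz' : -pvNet (s.drop k) = 0 := by omega
          have hstep : stepA s (-pvNet (s.drop (k + 1)), v) (k : Int)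
              = (-pvNet (s.drop k), s.take k) := by
            simp [stepA, hgetD, h2, hbr, hz', PySem.List.slice_to_natCast]
          rw [hstep, ih (Nat.le_of_succ_le hk) (s.take k), hfind, hcond]
          cases hfk : (List.range k).find? (pvCond s) <;> simp [pvResV]
        · have hcond : pvCond s k = false := by
            have hcnt : ¬ (s.drop k).count '(' = (s.drop k).count ')' := by
              have := pvNet_eq (s.drop k)
              omega
            simp [pvCond, hcnt]
          have hz' : ¬ -pvNet (s.drop k) = 0 := by omega
          have hstep : stepA s (-pvNet (s.drop (k + 1)), v) (k : Int)
              = (-pvNet (s.drop k), v) := by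
            simp [stepA, hgetD, h2, hbr, hz']
          rw [hstep, ih (Nat.le_of_succ_le hk) v, hfind, hcond]
          simp
      · have hw : pvW s[k] = 0 := by simp [pvW, h1, h2]
        have hcond : pvCond s k = false := by
          simp [pvCond, List.getElem?_eq_getElem hk', h2]
        have hbr : -pvNet (s.drop (k + 1)) = -pvNet (s.drop k) := by omega
        have hstep : stepA s (-pvNet (s.drop (k + 1)), v) (k : Int)
            = (-pvNet (s.drop k), v) := by
          simp [stepA, hgetD, h1, h2, hbr]
        rw [hstep, ih (Nat.le_of_succ_le hk) v, hfind, hcond]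
        simp

-- ===== VERDICT =====
theorem get_var_name_spec : Claim_equal_get_var_name := by
  intro arg _
  unfold Spec_get_var_name get_var_name get_var_name_alt
  by_cases hend : PySem.Str.endswith (PySem.Str.strip arg) ")" = true
  · rw [if_pos hend, if_pos hend]
    refine congrArg String.ofList ?_
    have hsuf : [')'] <:+ (PySem.Str.strip arg).toList := by
      have := (PySem.Chars.endswith_iff (PySem.Str.strip arg).toList [')']).mp
        (by simpa using hend)
      simpa using this
    generalize (PySem.Str.strip arg).toList = s at hsuf ⊢
    obtain ⟨t, ht⟩ := hsuf
    have hlen : s.length = t.length + 1 := by rw [← ht]; simp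
    have hlast : s.drop t.length = [')'] := by rw [← ht]; simp
    have hgetlast : s[t.length]? = some ')' := by
      have : (s.drop t.length)[0]? = some ')' := by rw [hlast]; rfl
      simpa using this
    have hA : (PySem.List.pyRange (PySem.List.len s - 2) (-1) (-1)).foldl (stepA s) (1, s)
        = (-pvNet s, pvResV s s ((List.range t.length).find? (pvCond s))) := by
      have h1 : PySem.List.len s - 2 = ((t.length : Nat) : Int) - 1 := by
        simp [PySem.List.len_eq, hlen]
        omega
      have h2 : -pvNet (s.drop t.length) = 1 := by
        rw [hlast]; decide
      rw [h1]
      have h3 := pvLA s t.length (by omega) s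
      rw [h2] at h3
      exact h3
    have hB : altGo s s 0 = pvResV s s ((List.range (t.length + 1)).find? (pvCond s)) := by
      have hb := pvLB s s 0 rfl
      rw [hb, ← hlen, ← List.range_eq_range']
    have hcondlast : pvCond s t.length = false := by
      simp [pvCond, hgetlast]
    have hfind : (List.range (t.length + 1)).find? (pvCond s)
        = (List.range t.length).find? (pvCond s) := by
      rw [List.range_succ, List.find?_append]
      cases hfk : (List.range t.length).find? (pvCond s) <;> simp [List.find?, hcondlast]
    rw [hA, hB, hfind]
  · rw [if_neg hend, if_neg hend]
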